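-- pv_equiv track=rewrite | github.com/timberhill/flashy | transmitter/screen_reader_async.py | _mean_rgb
-- ===== SOURCE A (Python) =====
-- def _mean_rgb(rgb_values):
--     """Calculate a mean value of an array of RGB values.
--
--     Args:
--         rgb_values (list): list of RGB tuples (0..255)
--
--     Returns:
--         tuple: 3 RGB values
--     """
--     N = len(rgb_values)
--     if N == 1:
--         return rgb_values[0]
--     return (
--         sum(value[0] for value in rgb_values) // N,
--         sum(value[1] for value in rgb_values) // N,
--         sum(value[2] for value in rgb_values) // N,
--     )
-- ===== SOURCE B (Python) =====
-- def _mean_rgb(rgb_values):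
--     """Calculate a mean value of an array of RGB values (single pass)."""
--     s0 = s1 = s2 = 0
--     for r, g, b in rgb_values:
--         s0 += r
--         s1 += g
--         s2 += b
--     N = len(rgb_values)
--     return (s0 // N, s1 // N, s2 // N)
-- ===== Notes on version B (the rewrite author's own statement) =====
-- stated objective: simpler
-- what changed: One accumulator loop over the list replaces three separate sum() passes, and the N==1 fast path is dropped since floor-dividing by 1 is the identity.
import Mathlib
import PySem

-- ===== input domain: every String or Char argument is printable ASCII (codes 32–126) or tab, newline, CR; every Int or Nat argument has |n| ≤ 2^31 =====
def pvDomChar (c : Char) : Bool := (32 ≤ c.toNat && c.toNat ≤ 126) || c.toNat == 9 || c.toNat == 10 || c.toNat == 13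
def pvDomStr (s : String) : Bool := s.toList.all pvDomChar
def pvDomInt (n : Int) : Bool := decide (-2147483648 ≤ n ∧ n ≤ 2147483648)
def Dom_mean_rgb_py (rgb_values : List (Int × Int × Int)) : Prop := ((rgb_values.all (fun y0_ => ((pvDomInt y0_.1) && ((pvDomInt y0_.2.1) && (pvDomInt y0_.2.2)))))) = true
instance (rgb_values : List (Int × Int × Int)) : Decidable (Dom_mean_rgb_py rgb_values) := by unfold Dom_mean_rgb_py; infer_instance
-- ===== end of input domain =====

-- B: one accumulator loop instead of three sum() passes; the N==1 fast path is dropped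
-- (floor-dividing by 1 is the identity). Equivalence is about the return value on nonempty input.

-- ===== PORT A =====
def mean_rgb_py (rgb_values : List (Int × Int × Int)) : Int × Int × Int :=
  let N : Int := rgb_values.length
  if N == 1 then
    -- rgb_values[0]; the list is nonempty here since its length is 1
    match rgb_values with
    | x :: _ => x
    | [] => (0, 0, 0)
  else
    (PySem.Int.floordiv ((rgb_values.map (fun v => v.1)).sum) N,
     PySem.Int.floordiv ((rgb_values.map (fun v => v.2.1)).sum) N,
     PySem.Int.floordiv ((rgb_values.map (fun v => v.2.2)).sum) N)

-- ===== PORT B =====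
def mean_rgb_py_alt (rgb_values : List (Int × Int × Int)) : Int × Int × Int :=
  let s := rgb_values.foldl
    (fun (s : Int × Int × Int) v => (s.1 + v.1, s.2.1 + v.2.1, s.2.2 + v.2.2))
    (0, 0, 0)
  let N : Int := rgb_values.length
  (PySem.Int.floordiv s.1 N, PySem.Int.floordiv s.2.1 N, PySem.Int.floordiv s.2.2 N)

-- ===== PRECONDITION & SPEC =====
-- Pre_ excludes only the empty list, on which both Pythons raise ZeroDivisionError.
def Pre_mean_rgb_py (rgb_values : List (Int × Int × Int)) : Prop := rgb_values ≠ []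
instance (rgb_values : List (Int × Int × Int)) : Decidable (Pre_mean_rgb_py rgb_values) := by
  unfold Pre_mean_rgb_py; infer_instance

def pvWitness_mean_rgb_py : (List (Int × Int × Int)) := [(1, 2, 3), (4, 5, 6)]

def Spec_mean_rgb_py (rgb_values : List (Int × Int × Int)) (out : Int × Int × Int) : Prop :=
  out = mean_rgb_py_alt rgb_values
instance (rgb_values : List (Int × Int × Int)) (out : Int × Int × Int) :
    Decidable (Spec_mean_rgb_py rgb_values out) := by unfold Spec_mean_rgb_py; infer_instance

-- ===== CLAIM (what is proved, stated in full; the proofs are below) =====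
def Claim_equal_mean_rgb_py : Prop := ∀ (rgb_values : List (Int × Int × Int)),
  Dom_mean_rgb_py rgb_values → Pre_mean_rgb_py rgb_values →
  Spec_mean_rgb_py rgb_values (mean_rgb_py rgb_values)

-- ===== LEMMAS AND PROOFS =====
-- B's single fold computes the triple of the three component sums.
theorem foldl_triple_sum (xs : List (Int × Int × Int)) (a b c : Int) :
    xs.foldl (fun (s : Int × Int × Int) v => (s.1 + v.1, s.2.1 + v.2.1, s.2.2 + v.2.2)) (a, b, c)
    = (a + (xs.map (fun v => v.1)).sum, b + (xs.map (fun v => v.2.1)).sum,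
       c + (xs.map (fun v => v.2.2)).sum) := by
  induction xs generalizing a b c with
  | nil => simp
  | cons x xs ih => simp [List.foldl, ih]; constructor <;> [ring_nf; constructor <;> ring_nf]

-- ===== VERDICT (by name: the statement is the Claim_ definition above) =====
theorem mean_rgb_py_spec : Claim_equal_mean_rgb_py := by
  intro xs _ hne
  unfold Spec_mean_rgb_py mean_rgb_py mean_rgb_py_alt
  rw [foldl_triple_sum]
  simp only [zero_add]
  match xs, hne with
  | [x], _ =>
      simp [PySem.Int.floordiv, Int.fdiv_one]
  | x :: y :: rest, _ =>
      have h : ¬ ((((x :: y :: rest : List (Int × Int × Int)).length : Int) == 1) = true) := by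
        simp
        omega
      rw [if_neg h]
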